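-- pv_equiv track=rewrite | github.com/DragunWF/Competitive-Programming | CodeWars/python/7_kyu/how_green_is_my_valley.py | make_valley
-- ===== SOURCE A (Python) =====
-- def make_valley(arr: list[int]) -> list[int]:
--     arr.sort(reverse=True)
--     first_half = []
--     second_half = []
--     for i, num in enumerate(arr):
--         if len(arr) % 2 != 0 and i == len(arr) - 1:
--             break
--         if i % 2 == 0:
--             first_half.append(num)
--         else:
--             second_half.append(num)
--     second_half.reverse()
--     if len(arr) % 2 == 0:
--         return [*first_half, *second_half]
--     return [*first_half, arr[-1], *second_half]
-- ===== SOURCE B (Python) =====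
-- def make_valley(arr: list[int]) -> list[int]:
--     arr.sort(reverse=True)
--     n = len(arr)
--     res = [0] * n
--     lo, hi = 0, n - 1
--     for i, num in enumerate(arr):
--         if i % 2 == 0:
--             res[lo] = num
--             lo += 1
--         else:
--             res[hi] = num
--             hi -= 1
--     return res
-- ===== Notes on version B (the rewrite author's own statement) =====
-- stated objective: alternative
-- what changed: Instead of distributing elements into two half-lists and reversing the second before concatenation, B writes the sorted elements directly into a preallocated result with two inward-moving pointers (largest to the outer ends), building the valley in one pass with no intermediate lists and no reverse.
import Mathlib
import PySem

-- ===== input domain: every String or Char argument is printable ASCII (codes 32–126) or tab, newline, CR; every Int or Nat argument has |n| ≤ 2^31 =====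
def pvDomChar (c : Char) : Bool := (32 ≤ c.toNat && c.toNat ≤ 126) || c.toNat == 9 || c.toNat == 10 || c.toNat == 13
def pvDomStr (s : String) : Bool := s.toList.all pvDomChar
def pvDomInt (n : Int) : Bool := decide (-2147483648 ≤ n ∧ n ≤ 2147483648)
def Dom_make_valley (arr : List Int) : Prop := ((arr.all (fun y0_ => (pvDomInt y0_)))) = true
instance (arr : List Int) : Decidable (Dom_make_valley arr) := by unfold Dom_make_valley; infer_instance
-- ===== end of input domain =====

-- B rebuilds the valley in one pass with two inward-moving write pointers instead of A's
-- two half-lists plus reverse; return values proved equal. Both Pythons sort arr in place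
-- (same mutation side effect); the equivalence proved here is about the return value.

-- ===== PORT A =====
-- A's for-loop over enumerate(arr) with the break when len(arr) is odd and i == len(arr)-1.
def mvLoopA (n : Nat) : Nat → List Int → List Int → List Int → (List Int × List Int)
  | _, [], fh, sh => (fh, sh)
  | i, num :: rest, fh, sh =>
    if n % 2 ≠ 0 ∧ i = n - 1 then (fh, sh)
    else if i % 2 = 0 then mvLoopA n (i + 1) rest (fh ++ [num]) sh
    else mvLoopA n (i + 1) rest fh (sh ++ [num])

def make_valley (arr : List Int) : List Int :=
  let s := PySem.List.sorted arr (fun x => x) true   -- arr.sort(reverse=True)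
  let p := mvLoopA s.length 0 s [] []
  if s.length % 2 = 0 then p.1 ++ p.2.reverse
  -- arr[-1]: this branch is only reached with s nonempty (odd length), where pyGet? is some,
  -- so Option.toList is exact here.
  else p.1 ++ (PySem.List.pyGet? s (-1)).toList ++ p.2.reverse

-- ===== PORT B =====
-- B's single pass: alternately write into res at lo (then lo+1) and at hi (then hi-1).
def mvLoopB : Nat → List Int → List Int → Nat → Nat → List Int
  | _, [], res, _, _ => res
  | i, num :: rest, res, lo, hi =>
    if i % 2 = 0 then mvLoopB (i + 1) rest (res.set lo num) (lo + 1) hi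
    else mvLoopB (i + 1) rest (res.set hi num) lo (hi - 1)

def make_valley_alt (arr : List Int) : List Int :=
  let s := PySem.List.sorted arr (fun x => x) true   -- arr.sort(reverse=True)
  mvLoopB 0 s (List.replicate s.length 0) 0 (s.length - 1)

-- ===== PRECONDITION & SPEC =====
def Spec_make_valley (arr : List Int) (out : List Int) : Prop := out = make_valley_alt arr
instance (arr : List Int) (out : List Int) : Decidable (Spec_make_valley arr out) := by unfold Spec_make_valley; infer_instance

-- ===== CLAIM (what is proved, stated in full; the proofs are below) =====
def Claim_equal_make_valley : Prop := ∀ (arr : List Int), Dom_make_valley arr → Spec_make_valley arr (make_valley arr)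

-- ===== LEMMAS AND PROOFS =====

-- elements at even indices (0,2,4,…)
def mvEvens : List Int → List Int
  | [] => []
  | [x] => [x]
  | x :: _ :: t => x :: mvEvens t

-- elements at even indices, dropping a solitary last element (what A's break keeps in first_half)
def mvEvens2 : List Int → List Int
  | [] => []
  | [_] => []
  | x :: _ :: t => x :: mvEvens2 t

-- elements at odd indices (1,3,5,…)
def mvOdds : List Int → List Int
  | [] => []
  | [_] => []
  | _ :: y :: t => y :: mvOdds t

theorem mvLoopA_eq (n : Nat) (t : List Int) : ∀ (i : Nat) (fh sh : List Int),
    i % 2 = 0 → i + t.length = n →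
    mvLoopA n i t fh sh = (fh ++ mvEvens2 t, sh ++ mvOdds t) := by
  induction t using mvEvens2.induct with
  | case1 => intro i fh sh _ _; simp [mvLoopA, mvEvens2, mvOdds]
  | case2 x =>
    intro i fh sh hpar hn
    simp only [List.length_cons, List.length_nil] at hn
    have hbrk : n % 2 ≠ 0 ∧ i = n - 1 := by omega
    simp [mvLoopA, hbrk.1, hbrk.2, mvEvens2, mvOdds]
  | case3 x y t ih =>
    intro i fh sh hpar hn
    simp only [List.length_cons] at hn
    have h1 : ¬ (n % 2 ≠ 0 ∧ i = n - 1) := by omega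
    have h2 : ¬ (n % 2 ≠ 0 ∧ i + 1 = n - 1) := by omega
    have h3 : ¬ ((i + 1) % 2 = 0) := by omega
    simp only [mvLoopA, h1, h2, h3, hpar, if_false, if_pos]
    rw [ih (i + 1 + 1) (fh ++ [x]) (sh ++ [y]) (by omega) (by omega)]
    simp [mvEvens2, mvOdds]

theorem mvEvens2_eq_of_even (s : List Int) (h : s.length % 2 = 0) : mvEvens2 s = mvEvens s := by
  induction s using mvEvens2.induct with
  | case1 => rfl
  | case2 x => simp at h
  | case3 x y t ih => simp at h; simp [mvEvens2, mvEvens, ih (by omega)]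

theorem mvEvens2_append_last (s : List Int) (h : s.length % 2 = 1) :
    mvEvens2 s ++ s.getLast?.toList = mvEvens s := by
  induction s using mvEvens2.induct with
  | case1 => simp at h
  | case2 x => simp [mvEvens2, mvEvens]
  | case3 x y t ih =>
    have ht : t.length % 2 = 1 := by simp at h; omega
    have htne : t ≠ [] := by intro he; rw [he] at ht; simp at ht
    obtain ⟨z, t', rfl⟩ := List.exists_cons_of_ne_nil htne
    rw [List.getLast?_cons_cons, List.getLast?_cons_cons]
    simpa [mvEvens2, mvEvens] using ih ht

theorem mvSet_split (res : List Int) (k : Nat) (v : Int) (h : k < res.length) :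
    res.set k v = res.take k ++ v :: res.drop (k + 1) := by
  induction res generalizing k with
  | nil => simp at h
  | cons a l ih =>
    cases k with
    | zero => simp
    | succ m => simp at h; simp [List.set, ih m (by omega)]

theorem mvLoopB_eq (t : List Int) : ∀ (i : Nat) (res : List Int) (lo hi : Nat),
    i % 2 = 0 → hi + 1 = lo + t.length → hi < res.length →
    mvLoopB i t res lo hi = res.take lo ++ mvEvens t ++ (mvOdds t).reverse ++ res.drop (lo + t.length) := by
  induction t using mvEvens2.induct with
  | case1 =>
    intro i res lo hi _ hlen hres
    simp only [List.length_nil] at hlen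
    have : lo = hi + 1 := by omega
    simp [mvLoopB, mvEvens, mvOdds, this]
  | case2 x =>
    intro i res lo hi hpar hlen hres
    simp only [List.length_cons, List.length_nil] at hlen
    have hlo : lo < res.length := by omega
    simp only [mvLoopB, hpar, if_pos]
    rw [mvSet_split res lo x hlo]
    simp [mvEvens, mvOdds]
  | case3 x y t ih =>
    intro i res lo hi hpar hlen hres
    simp only [List.length_cons] at hlen
    have hhi : hi = lo + t.length + 1 := by omega
    have hlo : lo < res.length := by omega
    have h3 : ¬ ((i + 1) % 2 = 0) := by omega
    rw [show mvLoopB i (x :: y :: t) res lo hi =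
        mvLoopB (i + 1 + 1) t ((res.set lo x).set hi y) (lo + 1) (hi - 1) by
      simp [mvLoopB, hpar, h3]]
    rw [ih (i + 1 + 1) ((res.set lo x).set hi y) (lo + 1) (hi - 1) (by omega)
        (by omega) (by simp only [List.length_set]; omega)]
    have hA : res.set lo x = res.take lo ++ x :: res.drop (lo + 1) := mvSet_split res lo x hlo
    have hB : (res.set lo x).set hi y =
        (res.set lo x).take hi ++ y :: (res.set lo x).drop (hi + 1) :=
      mvSet_split _ hi y (by simp only [List.length_set]; omega)
    -- take (lo+1) of the doubly-set list = res.take lo ++ [x]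
    have htk : ((res.set lo x).set hi y).take (lo + 1) = res.take lo ++ [x] := by
      rw [hB, List.take_append]
      have h1 : ((res.set lo x).take hi).length = hi := by
        simp only [List.length_take, List.length_set]; omega
      rw [h1, List.take_take]
      rw [show min (lo + 1) hi = lo + 1 by omega, show lo + 1 - hi = 0 by omega]
      rw [hA, List.take_append]
      have h2 : (res.take lo).length = lo := by simp only [List.length_take]; omega
      rw [h2, List.take_take, show min (lo + 1) lo = lo by omega,
          show lo + 1 - lo = 1 by omega]
      simp
    -- drop hi of the doubly-set list = y :: res.drop (hi+1)
    have hdr : ((res.set lo x).set hi y).drop hi = y :: res.drop (hi + 1) := by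
      rw [hB, List.drop_append]
      have h1 : ((res.set lo x).take hi).length = hi := by
        simp only [List.length_take, List.length_set]; omega
      rw [h1, List.drop_take, show hi - hi = 0 by omega]
      simp only [List.take_zero, List.nil_append, List.drop_zero]
      rw [hA, List.drop_append]
      have h2 : (res.take lo).length = lo := by simp only [List.length_take]; omega
      rw [h2]
      have hd : (res.take lo).drop (hi + 1) = [] := by
        apply List.drop_eq_nil_of_le; simp only [List.length_take]; omega
      rw [hd, List.nil_append, show hi + 1 - lo = (hi - lo) + 1 by omega]
      simp [List.drop_drop, show lo + 1 + (hi - lo) = hi + 1 by omega]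
    rw [show lo + 1 + t.length = hi by omega, htk, hdr]
    simp only [List.length_cons, show lo + (t.length + 1 + 1) = hi + 1 by omega]
    simp [mvEvens, mvOdds]

-- the arrangement of the sorted list is the same in both ports
theorem mv_core (s : List Int) :
    (let p := mvLoopA s.length 0 s [] []
     if s.length % 2 = 0 then p.1 ++ p.2.reverse
     else p.1 ++ (PySem.List.pyGet? s (-1)).toList ++ p.2.reverse)
    = mvLoopB 0 s (List.replicate s.length 0) 0 (s.length - 1) := by
  rcases List.eq_nil_or_concat s with rfl | ⟨_, _, hne⟩
  · simp [mvLoopA, mvLoopB]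
  have hsne : s ≠ [] := by rw [hne]; simp
  have hpos : 0 < s.length := List.length_pos_iff.mpr hsne
  rw [mvLoopB_eq s 0 (List.replicate s.length 0) 0 (s.length - 1) (by omega)
      (by simp; omega) (by simp; omega)]
  rw [mvLoopA_eq s.length s 0 [] [] (by omega) (by omega)]
  simp only [List.take_zero, List.nil_append, Nat.zero_add, List.drop_replicate]
  by_cases hpar : s.length % 2 = 0
  · rw [if_pos hpar, mvEvens2_eq_of_even s hpar]
    simp
  · rw [if_neg hpar, PySem.List.pyGet?_neg_one]
    have h1 : s.length % 2 = 1 := by omega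
    rw [← mvEvens2_append_last s h1]
    simp

-- ===== VERDICT (by name: the statement is the Claim_ definition above) =====
theorem make_valley_spec : Claim_equal_make_valley := by
  intro arr _
  unfold Spec_make_valley make_valley make_valley_alt
  exact mv_core (PySem.List.sorted arr (fun x => x) true)
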